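-- pv_equiv track=rewrite | github.com/dpalatynski/AdventOfCode | 2023/Day_05.py | create_maps
-- ===== SOURCE A (Python) =====
-- def create_maps(content):
--     maps = {}
--     new_map = True
--     for v1 in content[2:]:
--         if v1 == "":
--             new_map = True
--             continue
--
--         if new_map:
--             map_name = v1.strip()[:-5]
--             maps[map_name] = []
--             new_map = False
--             continue
--
--         dest, source, count = v1.strip().split()
--         dest = int(dest)
--         source = int(source)
--         count = int(count)
--         maps[map_name].append([dest, source, count])
--
--     return maps
-- ===== SOURCE B (Python) =====
-- def create_maps(content):
--     lines = content[2:]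
--     return {
--         block[0].strip()[:-5]: [[int(x) for x in row.strip().split()] for row in block[1:]]
--         for block in _blocks(lines)
--     }
--
--
-- def _blocks(lines):
--     blocks = []
--     i, n = 0, len(lines)
--     while i < n:
--         if lines[i] == "":
--             i += 1
--             continue
--         j = i + 1
--         while j < n and lines[j] != "":
--             j += 1
--         blocks.append(lines[i:j])
--         i = j
--     return blocks
-- ===== Notes on version B (the rewrite author's own statement) =====
-- stated objective: alternative
-- what changed: A's single interleaved loop with a running new_map flag and mutable current-map state is replaced by a two-pass group-then-transform structure: content[2:] is first partitioned into blank-separated blocks by an index scan, then each block independently becomes one dict entry (header name -> parsed rows) in a dict comprehension.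
import Mathlib
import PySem

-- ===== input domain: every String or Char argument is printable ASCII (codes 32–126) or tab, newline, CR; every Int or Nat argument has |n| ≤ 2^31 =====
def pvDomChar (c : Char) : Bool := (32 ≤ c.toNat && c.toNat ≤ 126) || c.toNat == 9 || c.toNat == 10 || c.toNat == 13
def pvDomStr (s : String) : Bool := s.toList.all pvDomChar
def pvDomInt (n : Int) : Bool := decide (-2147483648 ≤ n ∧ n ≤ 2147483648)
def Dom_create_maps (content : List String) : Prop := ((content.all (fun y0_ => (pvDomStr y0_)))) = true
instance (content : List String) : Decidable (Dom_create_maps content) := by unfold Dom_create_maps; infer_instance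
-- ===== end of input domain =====

-- B replaces A's running new_map flag by an explicit two-pass structure: group content[2:] into
-- blank-separated blocks, then turn each block into one dict entry (objective: alternative decomposition).


-- ===== PORT A =====
-- loop state: (maps, new_map, map_name); map_name starts as "" but is only read after a header set it
def aStep (st : PySem.Dict String (List (List Int)) × Bool × String) (v1 : String) :
    PySem.Dict String (List (List Int)) × Bool × String :=
  if v1 == "" then (st.1, true, st.2.2)
  else if st.2.1 then
    let map_name := PySem.Str.slice (PySem.Str.strip v1) none (some (-5))
    (st.1.insert map_name [], false, map_name)
  else
    match (PySem.Str.split₀ (PySem.Str.strip v1)) with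
    | [dest, source, count] =>
      match PySem.Int.ofStr? dest, PySem.Int.ofStr? source, PySem.Int.ofStr? count with
      | some d, some s, some c => (st.1.modify st.2.2 [] (· ++ [[d, s, c]]), false, st.2.2)
      | _, _, _ => st  -- int() raised ValueError: outside Pre_
    | _ => st          -- tuple unpacking raised ValueError: outside Pre_

def create_maps (content : List String) : List (String × List (List Int)) :=
  ((PySem.List.slice content (some 2) none).foldl aStep (PySem.Dict.empty, true, "")).1.items

-- ===== PORT B =====
-- _blocks of Source B: the outer while loop (index i) is the recursion, the inner
-- 'while j < n and lines[j] != ""' is takeWhile/dropWhile, lines[i:j] the appended group;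
-- the Nat argument is fuel only (always lines.length, enough for full recursion)
def pvBlocksGo : Nat → List String → List (List String)
  | 0, _ => []
  | _, [] => []
  | fuel + 1, h :: t =>
    if h == "" then pvBlocksGo fuel t
    else (h :: t.takeWhile (· ≠ "")) :: pvBlocksGo fuel (t.dropWhile (· ≠ ""))

def pvBlocks (lines : List String) : List (List String) := pvBlocksGo lines.length lines

def pvParseRow (row : String) : List Int :=
  (PySem.Str.split₀ (PySem.Str.strip row)).map (fun x => (PySem.Int.ofStr? x).getD 0)

def pvBlockEntry (m : PySem.Dict String (List (List Int))) (block : List String) :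
    PySem.Dict String (List (List Int)) :=
  m.insert (PySem.Str.slice (PySem.Str.strip (block.headD "")) none (some (-5)))
    (block.tail.map pvParseRow)

def create_maps_alt (content : List String) : List (String × List (List Int)) :=
  ((pvBlocks (PySem.List.slice content (some 2) none)).foldl pvBlockEntry PySem.Dict.empty).items

-- ===== PRECONDITION & SPEC =====
-- a data row parses as exactly three int()-parsable tokens
def pvRowOk (r : String) : Prop :=
  (PySem.Str.split₀ (PySem.Str.strip r)).length = 3 ∧
    ∀ x ∈ PySem.Str.split₀ (PySem.Str.strip r), (PySem.Int.ofStr? x).isSome = true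

-- Pre_ excludes exactly the inputs on which A raises ValueError: a data row of content[2:]
-- (a non-blank line whose predecessor line is also non-blank) that does not split into
-- exactly three int()-parsable tokens.
def Pre_create_maps (content : List String) : Prop :=
  ∀ p ∈ (PySem.List.slice content (some 2) none).zip (PySem.List.slice content (some 2) none).tail,
    p.1 ≠ "" → p.2 ≠ "" → pvRowOk p.2

instance (content : List String) : Decidable (Pre_create_maps content) := by
  unfold Pre_create_maps pvRowOk; infer_instance

def pvWitness_create_maps : List String :=
  ["seeds: 79 14", "", "seed-to-soil map:", "50 98 2", "52 50 48", "", "soil-to-fertilizer map:"]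

def Spec_create_maps (content : List String) (out : List (String × List (List Int))) : Prop :=
  out = create_maps_alt content
instance (content : List String) (out : List (String × List (List Int))) :
    Decidable (Spec_create_maps content out) := by unfold Spec_create_maps; infer_instance

-- ===== CLAIM (what is proved, stated in full; the proofs are below) =====
def Claim_equal_create_maps : Prop := ∀ (content : List String), Dom_create_maps content →
  Pre_create_maps content → Spec_create_maps content (create_maps content)

-- ===== LEMMAS AND PROOFS =====

-- the fuel argument of pvBlocksGo is irrelevant once it covers the list length
theorem pvBlocksGo_fuel (fuel fuel' : Nat) : ∀ (lines : List String), lines.length ≤ fuel →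
    lines.length ≤ fuel' → pvBlocksGo fuel lines = pvBlocksGo fuel' lines := by
  induction fuel generalizing fuel' with
  | zero =>
    intro lines h _
    have : lines = [] := List.eq_nil_of_length_eq_zero (Nat.le_zero.mp h)
    subst this
    cases fuel' <;> rfl
  | succ f ih =>
    intro lines h h'
    cases lines with
    | nil => cases fuel' <;> rfl
    | cons x t =>
      cases fuel' with
      | zero => simp at h'
      | succ f' =>
        simp only [List.length_cons, Nat.add_le_add_iff_right] at h h'
        simp only [pvBlocksGo]
        split
        · exact ih f' t h h'
        · rw [ih f' (t.dropWhile (· ≠ ""))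
            (le_trans (List.length_dropWhile_le _ t) h) (le_trans (List.length_dropWhile_le _ t) h')]

theorem pvBlocks_blank (t : List String) : pvBlocks ("" :: t) = pvBlocks t := rfl

theorem pvBlocks_cons {h : String} (t : List String) (hh : h ≠ "") :
    pvBlocks (h :: t) = (h :: t.takeWhile (· ≠ "")) :: pvBlocks (t.dropWhile (· ≠ "")) := by
  show pvBlocksGo (t.length + 1) (h :: t) = _
  have hb : (h == "") = false := by simpa using hh
  simp only [pvBlocksGo, hb, Bool.false_eq_true, if_false, pvBlocks]
  rw [pvBlocksGo_fuel t.length (t.dropWhile (· ≠ "")).length (t.dropWhile (· ≠ ""))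
    (List.length_dropWhile_le _ t) le_rfl]

-- the adjacent-pair precondition on a bare line list
def pvZOk (lines : List String) : Prop :=
  ∀ p ∈ lines.zip lines.tail, p.1 ≠ "" → p.2 ≠ "" → pvRowOk p.2

theorem pvZOk_tail {x : String} {t : List String} (h : pvZOk (x :: t)) : pvZOk t := by
  intro p hp
  apply h
  cases t with
  | nil => simp at hp
  | cons y t' => simp [List.zip] at hp ⊢; right; exact hp

theorem pvZOk_dropWhile {t : List String} (h : pvZOk t) (p : String → Bool) :
    pvZOk (t.dropWhile p) := by
  induction t with
  | nil => simpa using h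
  | cons x t' ih =>
    rw [List.dropWhile_cons]
    split
    · exact ih (pvZOk_tail h)
    · exact h

theorem pvZOk_head_pair {x y : String} {t : List String} (h : pvZOk (x :: y :: t))
    (hx : x ≠ "") (hy : y ≠ "") : pvRowOk y := by
  apply h (x, y) _ hx hy
  simp [List.zip]

theorem pvZOk_takeWhile {h : String} {t : List String} (hz : pvZOk (h :: t)) (hh : h ≠ "") :
    ∀ r ∈ t.takeWhile (· ≠ ""), pvRowOk r := by
  induction t generalizing h with
  | nil => simp
  | cons y t' ih =>
    rw [List.takeWhile_cons]
    split
    · rename_i hy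
      have hy' : y ≠ "" := by simpa using hy
      intro r hr
      rcases List.mem_cons.mp hr with rfl | hr'
      · exact pvZOk_head_pair hz hh hy'
      · exact ih (pvZOk_tail hz) hy' r hr'
    · simp

-- a run of good data rows: A appends each parsed row to the dict entry at nm
theorem pv_dataPhase (rows : List String) : ∀ (rest : List String)
    (d : PySem.Dict String (List (List Int))) (nm : String) (acc : List (List Int)),
    (∀ r ∈ rows, r ≠ "" ∧ pvRowOk r) →
    (rows ++ rest).foldl aStep (d.insert nm acc, false, nm) =
      rest.foldl aStep (d.insert nm (acc ++ rows.map pvParseRow), false, nm) := by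
  induction rows with
  | nil => intro rest d nm acc _; simp
  | cons r rs ih =>
    intro rest d nm acc hok
    obtain ⟨hne, hro⟩ := hok r (List.mem_cons_self ..)
    obtain ⟨hlen, hparse⟩ := hro
    have hstep : aStep (d.insert nm acc, false, nm) r =
        (d.insert nm (acc ++ [pvParseRow r]), false, nm) := by
      obtain ⟨a, b, c, hp⟩ : ∃ a b c, PySem.Str.split₀ (PySem.Str.strip r) = [a, b, c] := by
        rcases hsp : PySem.Str.split₀ (PySem.Str.strip r) with _ | ⟨a, _ | ⟨b, _ | ⟨c, _ | _⟩⟩⟩ <;>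
          simp [hsp] at hlen
        exact ⟨a, b, c, rfl⟩
      rw [hp] at hparse
      obtain ⟨va, hva⟩ := Option.isSome_iff_exists.mp (hparse a (by simp))
      obtain ⟨vb, hvb⟩ := Option.isSome_iff_exists.mp (hparse b (by simp))
      obtain ⟨vc, hvc⟩ := Option.isSome_iff_exists.mp (hparse c (by simp))
      have hr0 : (r == "") = false := by simpa using hne
      simp only [aStep, hr0, hp, hva, hvb, hvc, Bool.false_eq_true, if_false,
        PySem.Dict.modify, PySem.Dict.getD_insert_self, PySem.Dict.insert_insert_self,
        pvParseRow, List.map_cons, List.map_nil, Option.getD_some]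
    simp only [List.cons_append, List.foldl_cons, hstep, ih rest d nm (acc ++ [pvParseRow r])
      (fun r hr => hok r (List.mem_cons_of_mem _ hr)), List.map_cons, List.append_assoc,
      List.singleton_append, List.nil_append]

-- main invariant: from a fresh (new_map = true) state, A's interleaved flag loop builds
-- exactly B's block-by-block dict
theorem pv_main (n : Nat) : ∀ (lines : List String), lines.length ≤ n →
    ∀ (d : PySem.Dict String (List (List Int))) (name : String), pvZOk lines →
    (lines.foldl aStep (d, true, name)).1 = (pvBlocks lines).foldl pvBlockEntry d := by
  induction n with
  | zero =>
    intro lines h d name _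
    have : lines = [] := List.eq_nil_of_length_eq_zero (Nat.le_zero.mp h)
    subst this; rfl
  | succ n' ih =>
    intro lines hlen d name hz
    cases lines with
    | nil => rfl
    | cons h t =>
      by_cases hh : h = ""
      · subst hh
        rw [pvBlocks_blank]
        have : aStep (d, true, name) "" = (d, true, name) := rfl
        simp only [List.foldl_cons, this]
        exact ih t (by simpa using hlen) d name (pvZOk_tail hz)
      · have hstep : aStep (d, true, name) h =
            (d.insert (PySem.Str.slice (PySem.Str.strip h) none (some (-5))) [], false,
              PySem.Str.slice (PySem.Str.strip h) none (some (-5))) := by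
          simp [aStep, hh]
        set nm := PySem.Str.slice (PySem.Str.strip h) none (some (-5)) with hnm
        have hsplit : t.takeWhile (· ≠ "") ++ t.dropWhile (· ≠ "") = t :=
          List.takeWhile_append_dropWhile
        have hrows : ∀ r ∈ t.takeWhile (· ≠ ""), r ≠ "" ∧ pvRowOk r := by
          intro r hr
          refine ⟨by simpa using List.mem_takeWhile_imp hr, pvZOk_takeWhile hz hh r hr⟩
        rw [pvBlocks_cons t hh, List.foldl_cons, List.foldl_cons, hstep]
        conv_lhs => rw [← hsplit]
        rw [pv_dataPhase _ _ d nm [] hrows, List.nil_append]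
        have hbe : pvBlockEntry d (h :: t.takeWhile (· ≠ "")) =
            d.insert nm ((t.takeWhile (· ≠ "")).map pvParseRow) := rfl
        rw [hbe]
        set d' := d.insert nm ((t.takeWhile (· ≠ "")).map pvParseRow) with hd'
        have hzdrop : pvZOk (t.dropWhile (· ≠ "")) := pvZOk_dropWhile (pvZOk_tail hz) _
        rcases hrest : t.dropWhile (· ≠ "") with _ | ⟨e, rest'⟩
        · rfl
        · have he : e = "" := by
            have := List.head?_dropWhile_not (fun x => decide (x ≠ "")) t
            rw [hrest] at this; simpa using this
          subst he
          have hstep2 : aStep (d', false, nm) "" = (d', true, nm) := rfl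
          rw [List.foldl_cons, hstep2, pvBlocks_blank]
          have hlen' : rest'.length ≤ n' := by
            have h1 : (t.dropWhile (· ≠ "")).length ≤ t.length := List.length_dropWhile_le _ t
            rw [hrest] at h1
            simp only [List.length_cons] at h1 hlen
            omega
          rw [hrest] at hzdrop
          exact ih rest' hlen' d' nm (pvZOk_tail hzdrop)

-- ===== VERDICT (by name: the statement is the Claim_ definition above) =====
theorem create_maps_spec : Claim_equal_create_maps := by
  intro content _ hpre
  unfold Spec_create_maps create_maps create_maps_alt
  exact congrArg PySem.Dict.items
    (pv_main (PySem.List.slice content (some 2) none).length _ le_rfl _ _ hpre)
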